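-- pv_equiv track=rewrite | github.com/pedapudi/harmonograf | client/harmonograf_client/adk.py | _canonicalize_assignee
-- ===== SOURCE A (Python) =====
-- def _normalize_agent_id(raw: str) -> str:
--     """Lowercase + strip hyphens/underscores/whitespace for fuzzy match."""
--     if not raw:
--         return ""
--     return raw.lower().replace("-", "").replace("_", "").replace(" ", "")
--
-- def _canonicalize_assignee(raw: str, known_agents: list[str]) -> str:
--     """Resolve ``raw`` against ``known_agents`` returning the canonical
--     name. LLM planners hallucinate small formatting variations of agent
--     names ("research-agent" vs "research_agent", "Research_Agent", or
--     truncations like "research"); this helper tolerates all three.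
--
--     Resolution order:
--       1. Exact match (cheap early return).
--       2. Case/separator-insensitive exact match.
--       3. Case/separator-insensitive prefix/substring match (either
--          direction — handles LLM truncations).
--       4. Give up and return ``raw`` unchanged so downstream code can
--          still log/display what the LLM produced.
--     """
--     if not raw:
--         return ""
--     if raw in known_agents:
--         return raw
--     norm_raw = _normalize_agent_id(raw)
--     if not norm_raw:
--         return raw
--     for agent in known_agents:
--         if _normalize_agent_id(agent) == norm_raw:
--             return agent
--     for agent in known_agents:
--         norm_agent = _normalize_agent_id(agent)
--         if not norm_agent:
--             continue
--         if norm_raw.startswith(norm_agent) or norm_agent.startswith(norm_raw):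
--             return agent
--     return raw
-- ===== SOURCE B (Python) =====
-- def _normalize_agent_id(raw: str) -> str:
--     if not raw:
--         return ""
--     return raw.lower().replace("-", "").replace("_", "").replace(" ", "")
--
-- def _canonicalize_assignee(raw: str, known_agents: list[str]) -> str:
--     # Single pass: rank each agent (1 = normalized-equal, 2 = prefix either way),
--     # keep the first agent seen at the best rank; rank 1 wins immediately.
--     if not raw:
--         return ""
--     if raw in known_agents:
--         return raw
--     norm_raw = _normalize_agent_id(raw)
--     if not norm_raw:
--         return raw
--     best = None  # (rank, agent)
--     for agent in known_agents:
--         na = _normalize_agent_id(agent)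
--         if na == norm_raw:
--             rank = 1
--         elif na and (norm_raw.startswith(na) or na.startswith(norm_raw)):
--             rank = 2
--         else:
--             continue
--         if best is None or rank < best[0]:
--             best = (rank, agent)
--             if rank == 1:
--                 break
--     return best[1] if best is not None else raw
-- ===== Notes on version B (the rewrite author's own statement) =====
-- stated objective: alternative
-- what changed: Replaced A's two sequential normalized scans (exact-normalized, then prefix) with a single ranked pass that normalizes each agent once, keeps the first agent at the best rank (1 = normalized-equal beats 2 = prefix either way), and breaks on a rank-1 hit.
import Mathlib
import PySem

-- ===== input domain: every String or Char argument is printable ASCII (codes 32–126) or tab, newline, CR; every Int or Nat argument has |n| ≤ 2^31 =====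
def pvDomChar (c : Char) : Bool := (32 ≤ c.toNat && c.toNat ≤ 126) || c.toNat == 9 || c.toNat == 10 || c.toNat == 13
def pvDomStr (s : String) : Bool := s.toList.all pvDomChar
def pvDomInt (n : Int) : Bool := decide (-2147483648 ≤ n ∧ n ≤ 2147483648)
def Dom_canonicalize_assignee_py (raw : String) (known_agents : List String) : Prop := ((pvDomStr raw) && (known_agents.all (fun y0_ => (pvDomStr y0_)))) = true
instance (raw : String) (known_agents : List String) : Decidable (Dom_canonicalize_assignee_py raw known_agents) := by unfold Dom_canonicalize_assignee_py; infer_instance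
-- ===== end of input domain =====

-- B replaces A's two separate normalized scans by a single ranked pass (rank 1 = normalized-equal,
-- rank 2 = prefix either way, first agent at the best rank wins); alternative decomposition, same cost.

-- ===== PORT A =====
-- shared helper: port of _normalize_agent_id (identical in Source A and Source B)
def normalize_agent_id (raw : String) : String :=
  if raw = "" then ""
  else PySem.Str.replace (PySem.Str.replace (PySem.Str.replace (PySem.Str.lower raw) "-" "") "_" "") " " ""

-- A's first for-loop (normalized exact match, return first hit)
def aLoop1 (nr : String) : List String → Option String
  | [] => none
  | a :: rest => if normalize_agent_id a = nr then some a else aLoop1 nr rest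

-- A's second for-loop (prefix either direction, skipping empty normalizations)
def aLoop2 (nr : String) : List String → Option String
  | [] => none
  | a :: rest =>
    let na := normalize_agent_id a
    if na = "" then aLoop2 nr rest
    else if PySem.Str.startswith nr na || PySem.Str.startswith na nr then some a
    else aLoop2 nr rest

def canonicalize_assignee_py (raw : String) (known_agents : List String) : String :=
  if raw = "" then ""
  else if raw ∈ known_agents then raw
  else
    let nr := normalize_agent_id raw
    if nr = "" then raw
    else
      match aLoop1 nr known_agents with
      | some a => a
      | none =>
        match aLoop2 nr known_agents with
        | some a => a
        | none => raw

-- ===== PORT B =====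
-- B's single ranked pass; state `best` is Python's `best` (None or (rank, agent)); rank 1 breaks.
def altLoop (nr : String) : List String → Option (Int × String) → Option (Int × String)
  | [], best => best
  | a :: rest, best =>
    let na := normalize_agent_id a
    let rank? : Option Int :=
      if na = nr then some 1
      else if (na != "") && (PySem.Str.startswith nr na || PySem.Str.startswith na nr) then some 2
      else none
    match rank? with
    | none => altLoop nr rest best
    | some rank =>
      let best' :=
        match best with
        | none => some (rank, a)
        | some (br, _) => if rank < br then some (rank, a) else best
      if rank = 1 then best' else altLoop nr rest best'

def canonicalize_assignee_py_alt (raw : String) (known_agents : List String) : String :=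
  if raw = "" then ""
  else if raw ∈ known_agents then raw
  else
    let nr := normalize_agent_id raw
    if nr = "" then raw
    else
      match altLoop nr known_agents none with
      | some (_, a) => a
      | none => raw

-- ===== PRECONDITION & SPEC =====
def Spec_canonicalize_assignee_py (raw : String) (known_agents : List String) (out : String) : Prop := out = canonicalize_assignee_py_alt raw known_agents
instance (raw : String) (known_agents : List String) (out : String) : Decidable (Spec_canonicalize_assignee_py raw known_agents out) := by unfold Spec_canonicalize_assignee_py; infer_instance

-- ===== CLAIM (what is proved, stated in full; the proofs are below) =====
def Claim_equal_canonicalize_assignee_py : Prop := ∀ (raw : String) (known_agents : List String), Dom_canonicalize_assignee_py raw known_agents → Spec_canonicalize_assignee_py raw known_agents (canonicalize_assignee_py raw known_agents)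

-- ===== LEMMAS AND PROOFS =====

-- Once `best` holds a rank-2 agent, only a later normalized-exact (rank-1) hit can replace it.
lemma altLoop_some2 (nr b : String) : ∀ xs : List String,
    altLoop nr xs (some (2, b)) =
      (match aLoop1 nr xs with
       | some a => some ((1 : Int), a)
       | none => some ((2 : Int), b)) := by
  intro xs
  induction xs with
  | nil => simp [altLoop, aLoop1]
  | cons a rest ih =>
    by_cases h1 : normalize_agent_id a = nr
    · simp [altLoop, aLoop1, h1]
    · by_cases hz : normalize_agent_id a = ""
      · have hnr : ¬ nr = "" := fun h => h1 (hz.trans h.symm)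
        simp [altLoop, aLoop1, hz, hnr, ih]
      · by_cases hpa : PySem.Chars.startswith nr.toList (normalize_agent_id a).toList = true
        · simp [altLoop, aLoop1, h1, hz, hpa, ih]
        · by_cases hpb : PySem.Chars.startswith (normalize_agent_id a).toList nr.toList = true
          · simp [altLoop, aLoop1, h1, hz, hpa, hpb, ih]
          · simp [altLoop, aLoop1, h1, hz, hpa, hpb, ih]

-- Starting from `best = none`, the single ranked pass computes exactly A's two scans in order.
lemma altLoop_none (nr : String) : ∀ xs : List String,
    altLoop nr xs none =
      (match aLoop1 nr xs with
       | some a => some ((1 : Int), a)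
       | none => (aLoop2 nr xs).map (fun a => ((2 : Int), a))) := by
  intro xs
  induction xs with
  | nil => simp [altLoop, aLoop1, aLoop2]
  | cons a rest ih =>
    by_cases h1 : normalize_agent_id a = nr
    · simp [altLoop, aLoop1, h1]
    · by_cases hz : normalize_agent_id a = ""
      · have hnr : ¬ nr = "" := fun h => h1 (hz.trans h.symm)
        simp [altLoop, aLoop1, aLoop2, hz, hnr, ih]
      · by_cases hpa : PySem.Chars.startswith nr.toList (normalize_agent_id a).toList = true
        · simp [altLoop, aLoop1, aLoop2, h1, hz, hpa, ih, altLoop_some2]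
        · by_cases hpb : PySem.Chars.startswith (normalize_agent_id a).toList nr.toList = true
          · simp [altLoop, aLoop1, aLoop2, h1, hz, hpa, hpb, ih, altLoop_some2]
          · simp [altLoop, aLoop1, aLoop2, h1, hz, hpa, hpb, ih]

-- ===== VERDICT (by name: the statement is the Claim_ definition above) =====
theorem canonicalize_assignee_py_spec : Claim_equal_canonicalize_assignee_py := by
  intro raw ka _
  unfold Spec_canonicalize_assignee_py canonicalize_assignee_py canonicalize_assignee_py_alt
  by_cases h1 : raw = ""
  · simp [h1]
  by_cases h2 : raw ∈ ka
  · simp [h1, h2]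
  by_cases h3 : normalize_agent_id raw = ""
  · simp [h1, h2, h3]
  simp only [h1, h2, h3, if_false, if_neg]
  rw [altLoop_none]
  cases hA : aLoop1 (normalize_agent_id raw) ka
  · cases hB : aLoop2 (normalize_agent_id raw) ka <;> simp [hA, hB]
  · simp [hA]
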